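-- pv_equiv track=rewrite | github.com/pypi-data/pypi-mirror-43 | packages/pysass/pysass-0.1.0-py3-none-any.whl/pysass.py | fake_parser
-- ===== SOURCE A (Python) =====
-- def fake_parser(args):
--     ignore_next = False
--     out = []
--     for v in args:
--         if ignore_next:
--             ignore_next = False
--             continue
--         if v in ["-t", "--style", "-s", "--out-style"]:
--             ignore_next = True
--             continue
--         if v in [
--             "-m",
--             "-g",
--             "--sourcemap",
--             "-p",
--             "--precision",
--             "--source-comments",
--             "-v",
--             "--version",
--             "-h",
--             "--help",
--         ]:
--             continue
--         out.append(v)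
--     return out
-- ===== SOURCE B (Python) =====
-- VALUE_FLAGS = ["-t", "--style", "-s", "--out-style"]
-- BARE_FLAGS = [
--     "-m", "-g", "--sourcemap", "-p", "--precision",
--     "--source-comments", "-v", "--version", "-h", "--help",
-- ]
--
--
-- def fake_parser(args):
--     # Chunk-splitting: cut the argument list at each value-taking flag,
--     # drop the flag together with the token right after it, and strip the
--     # valueless flags from every chunk wholesale.
--     out = []
--     rest = args
--     while True:
--         j = None
--         for i, v in enumerate(rest):
--             if v in VALUE_FLAGS:
--                 j = i
--                 break
--         if j is None:
--             out.extend(v for v in rest if v not in BARE_FLAGS)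
--             return out
--         out.extend(v for v in rest[:j] if v not in BARE_FLAGS)
--         rest = rest[j + 2:]
-- ===== Notes on version B (the rewrite author's own statement) =====
-- stated objective: alternative
-- what changed: Replaced the per-element ignore_next state machine with a chunk-splitting algorithm: repeatedly search for the next value-taking flag, bulk-filter the valueless flags out of the preceding chunk, and cut out the flag plus its value before continuing on the remainder.
import Mathlib
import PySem

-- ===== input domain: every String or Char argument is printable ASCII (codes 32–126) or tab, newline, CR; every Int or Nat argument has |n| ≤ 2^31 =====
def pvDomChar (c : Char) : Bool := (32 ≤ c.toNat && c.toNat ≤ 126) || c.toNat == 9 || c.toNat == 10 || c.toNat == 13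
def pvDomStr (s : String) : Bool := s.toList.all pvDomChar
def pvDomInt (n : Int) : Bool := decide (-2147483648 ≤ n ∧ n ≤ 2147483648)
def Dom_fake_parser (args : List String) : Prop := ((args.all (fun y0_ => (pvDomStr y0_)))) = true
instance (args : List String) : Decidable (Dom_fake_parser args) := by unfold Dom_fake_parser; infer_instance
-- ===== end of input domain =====

-- B replaces A's ignore_next state machine with chunk splitting: find the next
-- value-taking flag, bulk-filter the chunk before it, cut flag+value, repeat.

-- ===== PORT A =====
-- one iteration of A's for-loop: state is (ignore_next, out)
def fakeParserStep (s : Bool × List String) (v : String) : Bool × List String :=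
  if s.1 then (false, s.2)
  else if v ∈ ["-t", "--style", "-s", "--out-style"] then (true, s.2)
  else if v ∈ ["-m", "-g", "--sourcemap", "-p", "--precision",
               "--source-comments", "-v", "--version", "-h", "--help"] then (false, s.2)
  else (false, s.2 ++ [v])

def fake_parser (args : List String) : List String :=
  (args.foldl fakeParserStep (false, [])).2

-- ===== PORT B =====
def pvVF : List String := ["-t", "--style", "-s", "--out-style"]
def pvBF : List String := ["-m", "-g", "--sourcemap", "-p", "--precision",
                           "--source-comments", "-v", "--version", "-h", "--help"]

-- B's inner 'for i, v in enumerate(rest): break at first value flag'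
def pvFirstVF? : List String → Option Nat
  | [] => none
  | v :: rest => if v ∈ pvVF then some 0 else (pvFirstVF? rest).map (· + 1)

theorem pvFirstVF?_ne_nil {args : List String} {j : Nat}
    (h : pvFirstVF? args = some j) : args ≠ [] := by
  intro he; subst he; simp [pvFirstVF?] at h

-- B's outer while-loop: each pass emits the filtered chunk before the next
-- value flag and cuts out the flag together with its value
def fakeParserChunks (args : List String) : List String :=
  match h : pvFirstVF? args with
  | none => args.filter (fun v => decide (v ∉ pvBF))
  | some j =>
      (args.take j).filter (fun v => decide (v ∉ pvBF))
        ++ fakeParserChunks (args.drop (j + 2))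
  termination_by args.length
  decreasing_by
    have := pvFirstVF?_ne_nil h
    have : 0 < args.length := List.length_pos_iff.mpr this
    simp; omega

def fake_parser_alt (args : List String) : List String := fakeParserChunks args

-- ===== PRECONDITION & SPEC =====
def Spec_fake_parser (args : List String) (out : List String) : Prop := out = fake_parser_alt args
instance (args : List String) (out : List String) : Decidable (Spec_fake_parser args out) := by unfold Spec_fake_parser; infer_instance

-- ===== CLAIM (what is proved, stated in full; the proofs are below) =====
def Claim_equal_fake_parser : Prop := ∀ (args : List String), Dom_fake_parser args → Spec_fake_parser args (fake_parser args)

-- ===== LEMMAS AND PROOFS =====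
theorem pvFirstVF?_none {args : List String} (h : pvFirstVF? args = none) :
    ∀ v ∈ args, v ∉ pvVF := by
  induction args with
  | nil => simp
  | cons v rest ih =>
    intro w hw
    by_cases hv : v ∈ pvVF
    · simp [pvFirstVF?, hv] at h
    · simp [pvFirstVF?, hv] at h
      rcases List.mem_cons.mp hw with rfl | hw
      · exact hv
      · exact ih h w hw

theorem pvFirstVF?_some {args : List String} {j : Nat}
    (h : pvFirstVF? args = some j) :
    (∀ v ∈ args.take j, v ∉ pvVF) ∧
    ∃ f rest, args.drop j = f :: rest ∧ f ∈ pvVF := by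
  induction args generalizing j with
  | nil => simp [pvFirstVF?] at h
  | cons v rest ih =>
    by_cases hv : v ∈ pvVF
    · simp [pvFirstVF?, hv] at h
      subst h
      exact ⟨by simp, v, rest, by simp, hv⟩
    · simp [pvFirstVF?, hv] at h
      obtain ⟨j', hj', rfl⟩ := h
      obtain ⟨h1, f, r, hdrop, hf⟩ := ih hj'
      refine ⟨?_, f, r, by simpa using hdrop, hf⟩
      intro w hw
      simp [List.take_succ_cons] at hw
      rcases hw with rfl | hw
      · exact hv
      · exact h1 w hw

-- a chunk with no value flags: A's loop just bulk-filters the bare flags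
theorem foldl_noVF (args : List String) (hnv : ∀ v ∈ args, v ∉ pvVF) :
    ∀ acc, args.foldl fakeParserStep (false, acc)
      = (false, acc ++ args.filter (fun v => decide (v ∉ pvBF))) := by
  induction args with
  | nil => simp
  | cons v rest ih =>
    intro acc
    have hv : v ∉ pvVF := hnv v (by simp)
    have hnv' : ∀ w ∈ rest, w ∉ pvVF := fun w hw => hnv w (by simp [hw])
    by_cases hb : v ∈ pvBF
    · have : fakeParserStep (false, acc) v = (false, acc) := by
        simp [fakeParserStep, pvVF, pvBF] at hv hb ⊢
        rw [if_neg (by tauto), if_pos (by tauto)]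
      rw [List.foldl_cons, this, ih hnv']
      simp [hb]
    · have : fakeParserStep (false, acc) v = (false, acc ++ [v]) := by
        simp [fakeParserStep, pvVF, pvBF] at hv hb ⊢
        rw [if_neg (by tauto), if_neg (by tauto)]
      rw [List.foldl_cons, this, ih hnv']
      simp [hb]

theorem pvChunks_nil : fakeParserChunks [] = [] := by
  rw [fakeParserChunks.eq_def]
  split
  · rfl
  · case _ j heq => simp [pvFirstVF?] at heq

theorem fakeParser_main (n : Nat) : ∀ (args : List String), args.length ≤ n →
    ∀ acc, (args.foldl fakeParserStep (false, acc)).2 = acc ++ fakeParserChunks args := by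
  induction n with
  | zero =>
    intro args h acc
    have : args = [] := List.eq_nil_of_length_eq_zero (Nat.le_zero.mp h)
    subst this
    rw [fakeParserChunks.eq_def]
    simp [pvFirstVF?]
  | succ n ih =>
    intro args h acc
    cases hfind : pvFirstVF? args with
    | none =>
      rw [fakeParserChunks.eq_def]
      split
      case _ heq => rw [foldl_noVF args (pvFirstVF?_none hfind)]
      case _ j' heq => rw [hfind] at heq; exact absurd heq (by simp)
    | some j =>
      obtain ⟨h1, f, rest, hdrop, hf⟩ := pvFirstVF?_some hfind
      have hsplit : args = args.take j ++ f :: rest := by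
        conv_lhs => rw [← List.take_append_drop j args, hdrop]
      have hlen : j + rest.length + 1 = args.length := by
        have := congrArg List.length hsplit
        have hj : (args.take j).length = j := by
          have : j < args.length := by
            by_contra hc
            push Not at hc
            rw [List.drop_eq_nil_of_le hc] at hdrop
            exact List.cons_ne_nil _ _ hdrop.symm
          simp [List.length_take, Nat.min_eq_left (Nat.le_of_lt this)]
        simp only [List.length_append, List.length_cons, hj] at this
        omega
      rw [fakeParserChunks.eq_def]
      split
      case _ heq => rw [hfind] at heq; exact absurd heq (by simp)
      case _ j' heq =>
      rw [hfind] at heq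
      injection heq with heq
      subst heq
      conv_lhs => rw [hsplit]
      rw [List.foldl_append, foldl_noVF (args.take j) h1, List.foldl_cons]
      have hstepf : ∀ o : List String, fakeParserStep (false, o) f = (true, o) := by
        intro o
        simp [pvVF] at hf
        rcases hf with rfl | rfl | rfl | rfl <;> simp [fakeParserStep]
      rw [hstepf]
      have hdrop2 : args.drop (j + 2) = rest.drop 1 := by
        have : args.drop (j + 2) = (args.drop j).drop 2 := by
          rw [List.drop_drop]
        rw [this, hdrop]
        simp
      cases rest with
      | nil =>
        rw [show args.drop (j + 2) = ([] : List String) from by simpa using hdrop2,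
          pvChunks_nil]
        simp
      | cons w rest' =>
        have hstepw : ∀ o : List String, fakeParserStep (true, o) w = (false, o) := by
          intro o; simp [fakeParserStep]
        rw [List.foldl_cons, hstepw]
        have hlen' : j + rest'.length + 2 = args.length := by simpa using hlen
        rw [ih rest' (by omega) (acc ++ (args.take j).filter (fun v => decide (v ∉ pvBF)))]
        simp [hdrop2]

-- ===== VERDICT (by name: the statement is the Claim_ definition above) =====
theorem fake_parser_spec : Claim_equal_fake_parser := by
  intro args _
  unfold Spec_fake_parser fake_parser fake_parser_alt
  simpa using fakeParser_main args.length args le_rfl []
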